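-- pv_equiv track=rewrite | github.com/mindspore-ai/akg | akg-mlir/python/akg_mlir/utils/dynamic_utils.py | _get_proper_reduce_x_config
-- ===== SOURCE A (Python) =====
-- def _get_proper_reduce_x_config(red_size, use_atomic=False):
--     block_num = 1
--     if use_atomic:
--         block_num = (red_size - 1) // 1024 + 1
--         red_size = (red_size - 1) // block_num + 1
--     thread_num = red_size if 32 > red_size else 32
--     while (thread_num * 4 < red_size and thread_num < 1024):
--         thread_num *= 2
--     return block_num, thread_num, (red_size - 1) // (thread_num * block_num) + 1
-- ===== SOURCE B (Python) =====
-- def _get_proper_reduce_x_config(red_size, use_atomic=False):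
--     block_num = 1
--     if use_atomic:
--         block_num = (red_size - 1) // 1024 + 1
--         red_size = (red_size - 1) // block_num + 1
--     if red_size < 32:
--         thread_num = red_size
--     else:
--         # closed form: smallest power of two p with 32 <= p and 4*p >= red_size, capped at 1024
--         need = (red_size + 3) // 4
--         thread_num = min(1024, 1 << max(5, (need - 1).bit_length()))
--     return block_num, thread_num, (red_size - 1) // (thread_num * block_num) + 1
-- ===== Notes on version B (the rewrite author's own statement) =====
-- stated objective: simpler
-- what changed: Replaces A's doubling while-loop over thread_num by a closed-form computation via bit_length (ceil(red_size/4), round up to a power of two, clamp to [32,1024]).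
import Mathlib
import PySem

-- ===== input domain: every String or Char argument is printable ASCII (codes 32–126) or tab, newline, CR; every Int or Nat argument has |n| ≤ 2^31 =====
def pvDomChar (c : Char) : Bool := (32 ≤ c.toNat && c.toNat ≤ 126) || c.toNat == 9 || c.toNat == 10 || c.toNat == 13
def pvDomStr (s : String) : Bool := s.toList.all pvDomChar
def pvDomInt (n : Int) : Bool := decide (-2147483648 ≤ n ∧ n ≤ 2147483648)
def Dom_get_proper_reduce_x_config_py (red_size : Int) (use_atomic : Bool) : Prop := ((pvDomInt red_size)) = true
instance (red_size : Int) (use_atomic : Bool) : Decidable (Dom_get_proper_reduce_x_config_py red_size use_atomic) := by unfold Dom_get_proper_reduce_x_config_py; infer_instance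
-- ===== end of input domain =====

-- B replaces A's doubling while-loop by a closed-form thread count via bit_length (simpler, loop-free).

-- ===== PORT A =====
-- A's while loop: while thread_num * 4 < red_size and thread_num < 1024: thread_num *= 2.
-- Ported with fuel; 10 steps strictly exceed the loop's possible iteration count (≤ 6) on every
-- input where A terminates (the loop only runs with thread_num ≥ 32, doubling up to 1024).
def pyLoopA : Nat → Int → Int → Int
  | 0, t, _ => t
  | n + 1, t, r => if t * 4 < r ∧ t < 1024 then pyLoopA n (t * 2) r else t

-- tail of A after the use_atomic rescale, with the (possibly updated) block_num and red_size
def pyTailA (block_num red_size : Int) : Int × Int × Int :=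
  let thread_num : Int := if 32 > red_size then red_size else 32
  let thread_num := pyLoopA 10 thread_num red_size
  (block_num, thread_num, PySem.Int.floordiv (red_size - 1) (thread_num * block_num) + 1)

def get_proper_reduce_x_config_py (red_size : Int) (use_atomic : Bool) : Int × Int × Int :=
  let block_num : Int := 1
  if use_atomic then
    let bn := PySem.Int.floordiv (red_size - 1) 1024 + 1
    pyTailA bn (PySem.Int.floordiv (red_size - 1) bn + 1)
  else pyTailA block_num red_size

-- ===== PORT B =====
-- tail of Source B after the use_atomic rescale; `1 << k` on a nonnegative Python int is 2 ^ k
def pyTailB (block_num r : Int) : Int × Int × Int :=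
  let thread_num : Int :=
    if r < 32 then r
    else
      let need := PySem.Int.floordiv (r + 3) 4
      min 1024 ((2 : Int) ^ (max 5 (PySem.Int.bitLength (need - 1))))
  (block_num, thread_num, PySem.Int.floordiv (r - 1) (thread_num * block_num) + 1)

def get_proper_reduce_x_config_py_alt (red_size : Int) (use_atomic : Bool) : Int × Int × Int :=
  if use_atomic then
    let bn := PySem.Int.floordiv (red_size - 1) 1024 + 1
    pyTailB bn (PySem.Int.floordiv (red_size - 1) bn + 1)
  else pyTailB 1 red_size

-- ===== PRECONDITION & SPEC =====
-- Pre_ excludes exactly the inputs on which A never returns: for red_size in [-1024, 0] it raises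
-- ZeroDivisionError (at 0 directly; with use_atomic, block_num becomes 0), and for red_size < 0
-- without use_atomic its while loop diverges.  (With use_atomic and red_size < -1024, block_num is
-- negative and A does return — those inputs stay inside Pre_.)
def Pre_get_proper_reduce_x_config_py (red_size : Int) (use_atomic : Bool) : Prop :=
  1 ≤ red_size ∨ (use_atomic = true ∧ red_size < -1024)
instance (red_size : Int) (use_atomic : Bool) : Decidable (Pre_get_proper_reduce_x_config_py red_size use_atomic) := by unfold Pre_get_proper_reduce_x_config_py; infer_instance
def pvWitness_get_proper_reduce_x_config_py : Int × Bool := (300, true)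
def Spec_get_proper_reduce_x_config_py (red_size : Int) (use_atomic : Bool) (out : Int × Int × Int) : Prop := out = get_proper_reduce_x_config_py_alt red_size use_atomic
instance (red_size : Int) (use_atomic : Bool) (out : Int × Int × Int) : Decidable (Spec_get_proper_reduce_x_config_py red_size use_atomic out) := by unfold Spec_get_proper_reduce_x_config_py; infer_instance

-- ===== CLAIM (what is proved, stated in full; the proofs are below) =====
def Claim_equal_get_proper_reduce_x_config_py : Prop := ∀ (red_size : Int) (use_atomic : Bool), Dom_get_proper_reduce_x_config_py red_size use_atomic → Pre_get_proper_reduce_x_config_py red_size use_atomic → Spec_get_proper_reduce_x_config_py red_size use_atomic (get_proper_reduce_x_config_py red_size use_atomic)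

-- ===== LEMMAS AND PROOFS =====

-- bitLength from a two-sided power-of-two bracket
theorem bl_le (n : Int) (k : Nat) (h : n.natAbs < 2 ^ k) : PySem.Int.bitLength n ≤ k := by
  by_cases h0 : n = 0
  · simp [h0, PySem.Int.bitLength_zero]
  · by_contra hb
    have h1 : 2 ^ (PySem.Int.bitLength n - 1) ≤ n.natAbs := PySem.Int.two_pow_bitLength_le n h0
    have h2 : (2 : Nat) ^ k ≤ 2 ^ (PySem.Int.bitLength n - 1) :=
      Nat.pow_le_pow_right (by norm_num) (by omega)
    omega

theorem bl_ge (n : Int) (k : Nat) (h : 2 ^ k ≤ n.natAbs) : k < PySem.Int.bitLength n := by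
  have h1 : n.natAbs < 2 ^ PySem.Int.bitLength n := PySem.Int.lt_two_pow_bitLength n
  have : (2 : Nat) ^ k < 2 ^ PySem.Int.bitLength n := by omega
  exact (Nat.pow_lt_pow_iff_right (by norm_num)).mp this

theorem bl_eq (n : Int) (k : Nat) (h1 : 2 ^ k ≤ n.natAbs) (h2 : n.natAbs < 2 ^ (k + 1)) :
    PySem.Int.bitLength n = k + 1 := by
  have := bl_le n (k + 1) h2
  have := bl_ge n k h1
  omega

-- the core equality: A's doubling loop = B's closed form, for every red_size ≥ 1
theorem thread_eq (r : Int) (hr : 1 ≤ r) :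
    pyLoopA 10 (if 32 > r then r else 32) r =
      (if r < 32 then r
       else min 1024 ((2 : Int) ^ (max 5 (PySem.Int.bitLength (PySem.Int.floordiv (r + 3) 4 - 1))))) := by
  have hfd : PySem.Int.floordiv (r + 3) 4 = (r + 3) / 4 :=
    PySem.Int.floordiv_eq_ediv_of_pos (by norm_num)
  by_cases h32 : r < 32
  · rw [if_pos (by omega : 32 > r), if_pos h32]
    simp only [pyLoopA]
    rw [if_neg (by omega)]
  · rw [if_neg (by omega : ¬ 32 > r), if_neg h32]
    set m : Int := PySem.Int.floordiv (r + 3) 4 - 1 with hm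
    rw [hfd] at hm
    rcases lt_or_ge r 129 with hA | hB
    · -- r ∈ [32,128] : thread 32
      have : PySem.Int.bitLength m ≤ 5 := bl_le m 5 (by omega)
      simp only [pyLoopA]
      rw [if_neg (by omega)]
      rw [max_eq_left this]
      norm_num
    · rcases lt_or_ge r 257 with hC | hD
      · -- r ∈ [129,256] : thread 64
        have hb : PySem.Int.bitLength m = 6 := bl_eq m 5 (by omega) (by omega)
        simp only [pyLoopA]
        rw [if_pos ⟨by omega, by omega⟩, if_neg (by omega)]
        rw [hb]
        norm_num
      · rcases lt_or_ge r 513 with hE | hF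
        · -- r ∈ [257,512] : thread 128
          have hb : PySem.Int.bitLength m = 7 := bl_eq m 6 (by omega) (by omega)
          simp only [pyLoopA]
          rw [if_pos ⟨by omega, by omega⟩, if_pos ⟨by omega, by omega⟩, if_neg (by omega)]
          rw [hb]
          norm_num
        · rcases lt_or_ge r 1025 with hG | hH
          · -- r ∈ [513,1024] : thread 256
            have hb : PySem.Int.bitLength m = 8 := bl_eq m 7 (by omega) (by omega)
            simp only [pyLoopA]
            rw [if_pos ⟨by omega, by omega⟩, if_pos ⟨by omega, by omega⟩,
              if_pos ⟨by omega, by omega⟩, if_neg (by omega)]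
            rw [hb]
            norm_num
          · rcases lt_or_ge r 2049 with hI | hJ
            · -- r ∈ [1025,2048] : thread 512
              have hb : PySem.Int.bitLength m = 9 := bl_eq m 8 (by omega) (by omega)
              simp only [pyLoopA]
              rw [if_pos ⟨by omega, by omega⟩, if_pos ⟨by omega, by omega⟩,
                if_pos ⟨by omega, by omega⟩, if_pos ⟨by omega, by omega⟩, if_neg (by omega)]
              rw [hb]
              norm_num
            · -- r ≥ 2049 : thread 1024 (cap)
              have hb : 10 ≤ PySem.Int.bitLength m := bl_ge m 9 (by omega)
              have hcap : min 1024 ((2 : Int) ^ (max 5 (PySem.Int.bitLength m))) = 1024 := by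
                rw [max_eq_right (by omega)]
                apply min_eq_left
                calc (1024 : Int) = 2 ^ 10 := by norm_num
                  _ ≤ 2 ^ PySem.Int.bitLength m := by
                      exact_mod_cast Nat.pow_le_pow_right (by norm_num) hb
              simp only [pyLoopA]
              rw [if_pos ⟨by omega, by omega⟩, if_pos ⟨by omega, by omega⟩,
                if_pos ⟨by omega, by omega⟩, if_pos ⟨by omega, by omega⟩,
                if_pos ⟨by omega, by omega⟩, if_neg (by omega)]
              rw [hcap]
              norm_num

-- ===== VERDICT (by name: the statement is the Claim_ definition above) =====
theorem get_proper_reduce_x_config_py_spec : Claim_equal_get_proper_reduce_x_config_py := by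
  intro red_size use_atomic _ hpre
  have tail_eq : ∀ (bn r : Int), 1 ≤ r → pyTailA bn r = pyTailB bn r := by
    intro bn r hr
    unfold pyTailA pyTailB
    dsimp only
    rw [thread_eq r hr]
  unfold Pre_get_proper_reduce_x_config_py at hpre
  unfold Spec_get_proper_reduce_x_config_py
  unfold get_proper_reduce_x_config_py get_proper_reduce_x_config_py_alt
  cases use_atomic
  · have hp : 1 ≤ red_size := by
      rcases hpre with h | ⟨h, _⟩
      · exact h
      · simp at h
    simpa using tail_eq 1 red_size hp
  · simp only [if_true]
    apply tail_eq
    have hd : PySem.Int.floordiv (red_size - 1) 1024 = (red_size - 1) / 1024 :=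
      PySem.Int.floordiv_eq_ediv_of_pos (by norm_num)
    set bn : Int := PySem.Int.floordiv (red_size - 1) 1024 + 1 with hbn
    rcases hpre with hp | ⟨_, hneg⟩
    · have h1 : 1 ≤ bn := by rw [hbn, hd]; omega
      have : 0 ≤ PySem.Int.floordiv (red_size - 1) bn := by
        rw [PySem.Int.floordiv_eq_ediv_of_pos (by omega)]
        exact Int.ediv_nonneg (by omega) (by omega)
      omega
    · have h1 : bn ≤ -1 := by rw [hbn, hd]; omega
      have : 0 ≤ PySem.Int.floordiv (red_size - 1) bn := by
        have h2 := PySem.Int.floordiv_neg_neg (red_size - 1) bn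
        rw [← h2, PySem.Int.floordiv_eq_ediv_of_pos (by omega)]
        exact Int.ediv_nonneg (by omega) (by omega)
      omega
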